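-- pv_equiv track=rewrite | github.com/nOctaveLay/Algorithm | 코딩테스트 준비 기초/시뮬레이션과 구현/20327.py | left_right_all
-- ===== SOURCE A (Python) =====
-- def left_right_all(arr,l):
--
--     # i,j는 초기위치
--     # m,k는 상대위치에서 움직일만한 거리
--
--     result = [[0 for _ in range(len(arr[0]))] for _ in range(len(arr))]
--     for i in range(0,len(arr),2**l):
--         for j in range(0,len(arr[0]),2**l):
--             for m in range(2**l):
--                 for k in range(2**l):
--                     result[i+m][j+k] = arr[i+m][-j-2**l+k]
--     return result
-- ===== SOURCE B (Python) =====
-- def left_right_all(arr, l):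
--     # Horizontal block mirror: split each row into blocks of width 2**l,
--     # reverse the block order and concatenate.
--     b = 2 ** l
--     out = []
--     for row in arr:
--         blocks = [row[c:c + b] for c in range(0, len(row), b)]
--         out.append([x for blk in reversed(blocks) for x in blk])
--     return out
-- ===== Notes on version B (the rewrite author's own statement) =====
-- stated objective: simpler
-- what changed: Replaces A's quadruple nested loop that writes one cell at a time via negative source indices with a per-row slice-into-blocks, reverse-the-block-list, concatenate construction; Pre_ excludes ragged arrays (a row whose length differs from len(arr[0])), on which A either raises IndexError or its negative indexing reads an accidental tail of longer rows, a corner no one would specify.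
-- outside the precondition, e.g. on left_right_all([[1, 2], [3, 4, 5]], 0): A returns [[2, 1], [5, 4]], B returns [[2, 1], [5, 4, 3]]; on left_right_all([[], [1]], 0): A returns [[], []], B returns [[], [1]]
import Mathlib
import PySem

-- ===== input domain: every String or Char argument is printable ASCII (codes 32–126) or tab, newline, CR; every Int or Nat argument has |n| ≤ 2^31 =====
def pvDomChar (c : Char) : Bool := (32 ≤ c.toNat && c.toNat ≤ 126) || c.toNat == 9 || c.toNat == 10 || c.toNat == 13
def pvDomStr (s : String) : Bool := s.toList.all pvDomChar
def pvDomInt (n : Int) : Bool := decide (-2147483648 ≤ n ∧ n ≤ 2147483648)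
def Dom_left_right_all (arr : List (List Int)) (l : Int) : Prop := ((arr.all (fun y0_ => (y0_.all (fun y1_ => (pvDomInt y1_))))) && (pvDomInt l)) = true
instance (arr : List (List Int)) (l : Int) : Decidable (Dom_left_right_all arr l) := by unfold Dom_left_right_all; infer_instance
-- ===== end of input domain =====

-- B re-implements the block-wise horizontal mirror by slicing each row into
-- width-2^l blocks, reversing the block list and concatenating, instead of A's
-- quadruple loop writing single cells through negative indices (objective: simpler).

-- ===== PORT A =====
-- result[r][c] = v (both indices are always ≥ 0 here; Python's IndexError cases are excluded by Pre_)
def pySet2 (res : List (List Int)) (r c : Int) (v : Int) : List (List Int) :=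
  PySem.List.pySetD res r (PySem.List.pySetD (PySem.List.pyGetD res r []) c v)

def left_right_all (arr : List (List Int)) (l : Int) : List (List Int) :=
  let b : Int := 2 ^ l.toNat
  -- result = [[0 for _ in range(len(arr[0]))] for _ in range(len(arr))]
  -- (arr[0] is never evaluated when arr = [], so the default [] is exact there)
  let result := List.replicate arr.length (List.replicate (PySem.List.pyGetD arr 0 []).length (0 : Int))
  (PySem.List.pyRange 0 (arr.length : Int) b).foldl (fun result i =>
    (PySem.List.pyRange 0 ((PySem.List.pyGetD arr 0 []).length : Int) b).foldl (fun result j =>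
      (PySem.List.pyRange 0 b 1).foldl (fun result m =>
        (PySem.List.pyRange 0 b 1).foldl (fun result k =>
          pySet2 result (i + m) (j + k)
            (PySem.List.pyGetD (PySem.List.pyGetD arr (i + m) []) (-j - b + k) 0))
          result) result) result) result

-- ===== PORT B =====
def left_right_all_alt (arr : List (List Int)) (l : Int) : List (List Int) :=
  let b : Int := 2 ^ l.toNat
  arr.map (fun row =>
    let blocks := (PySem.List.pyRange 0 (row.length : Int) b).map
      (fun c => PySem.List.slice row (some c) (some (c + b)))
    (blocks.reverse).flatMap id)

-- ===== PRECONDITION & SPEC =====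
-- Pre_ excludes (besides l < 0, where A raises TypeError, and widths/heights not
-- divisible by 2^l, where A raises IndexError) the ragged arrays — a row whose
-- length differs from len(arr[0]) — on which A either raises IndexError or its
-- per-row negative indexing reads an accidental tail of the longer rows, a
-- corner no one would specify; B reads each row front-to-back there.
def Pre_left_right_all (arr : List (List Int)) (l : Int) : Prop :=
  0 ≤ l ∧ (∀ row ∈ arr, row.length = (arr.headD []).length) ∧
    ((arr.headD []).length = 0 ∨
      (2 ^ l.toNat ∣ arr.length ∧ 2 ^ l.toNat ∣ (arr.headD []).length))
instance (arr : List (List Int)) (l : Int) : Decidable (Pre_left_right_all arr l) := by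
  unfold Pre_left_right_all; infer_instance

def pvWitness_left_right_all : List (List Int) × Int := ([[1, 2, 3, 4], [5, 6, 7, 8]], 1)

def Spec_left_right_all (arr : List (List Int)) (l : Int) (out : List (List Int)) : Prop := out = left_right_all_alt arr l
instance (arr : List (List Int)) (l : Int) (out : List (List Int)) : Decidable (Spec_left_right_all arr l out) := by unfold Spec_left_right_all; infer_instance

-- ===== CLAIM (what is proved, stated in full; the proofs are below) =====
def Claim_equal_left_right_all : Prop := ∀ (arr : List (List Int)) (l : Int), Dom_left_right_all arr l → Pre_left_right_all arr l → Spec_left_right_all arr l (left_right_all arr l)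

-- ===== LEMMAS AND PROOFS =====

-- `arr[0]` with default [] is headD
theorem pyGetD0 (arr : List (List Int)) : PySem.List.pyGetD arr 0 [] = arr.headD [] := by
  rw [PySem.List.pyGetD_zero]
  cases arr <;> rfl

-- range(0, c*b, b) as a Nat-indexed list
theorem pyRange_step_mul (b c : Nat) (hb : 0 < b) :
    PySem.List.pyRange 0 ((c * b : Nat) : Int) ((b : Nat) : Int) =
      (List.range c).map (fun t => ((b * t : Nat) : Int)) := by
  rw [PySem.List.pyRange_of_pos _ _ (by exact_mod_cast hb)]
  rcases Nat.eq_zero_or_pos c with hc | hc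
  · subst hc; simp
  · have hlt : (0:Int) < ((c*b : Nat):Int) := by exact_mod_cast Nat.mul_pos hc hb
    rw [if_pos hlt]
    have h2 : ((((c * b : Nat) : Int) - 0 + (b:Int) - 1) / (b:Int)).toNat = c := by
      have h3 : (((c * b : Nat) : Int) - 0 + (b:Int) - 1) = ((b:Int) - 1) + (b:Int) * c := by push_cast; ring
      rw [h3, Int.add_mul_ediv_left _ _ (by exact_mod_cast hb.ne' : (b:Int) ≠ 0)]
      rw [Int.ediv_eq_zero_of_lt (by omega) (by omega)]
      simp
    rw [h2]
    apply List.map_congr_left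
    intro t _
    push_cast; ring

theorem pyRange_one_nat (b : Nat) :
    PySem.List.pyRange 0 (b : Int) 1 = (List.range b).map (fun k => ((k : Nat) : Int)) := by
  rw [PySem.List.pyRange_one]
  simp

theorem take_succ_set {α : Type} (xs : List α) (j : Nat) (v : α) (h : j < xs.length) :
    (xs.set j v).take (j+1) = xs.take j ++ [v] := by
  apply List.ext_getElem
  · simp; omega
  · intro k h1 h2
    simp only [List.length_take, List.length_set] at h1
    rw [List.getElem_take]
    by_cases hk : k < j
    · rw [List.getElem_set_ne (by omega)]
      rw [List.getElem_append_left (by simp; omega), List.getElem_take]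
    · have hkj : k = j := by omega
      subst hkj
      rw [List.getElem_set_self]
      rw [List.getElem_append_right (by simp)]
      simp

-- a segment of updates k ↦ g k (current value) at positions j .. j+b-1
theorem foldl_set_seg {α : Type} (dflt : α) (g : Nat → α → α) :
    ∀ (b j : Nat) (xs : List α), j + b ≤ xs.length →
      (List.range b).foldl (fun r k => r.set (j + k) (g k (r.getD (j + k) dflt))) xs
        = xs.take j ++ (List.range b).map (fun k => g k (xs.getD (j + k) dflt)) ++ xs.drop (j + b) := by
  intro b
  induction b generalizing g with
  | zero => intro j xs h; simp
  | succ b ih =>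
    intro j xs h
    rw [List.range_succ_eq_map, List.foldl_cons, List.foldl_map]
    have hb1 : (fun (r : List α) (k : Nat) => r.set (j + (Nat.succ k)) (g (Nat.succ k) (r.getD (j + Nat.succ k) dflt)))
        = (fun (r : List α) (k : Nat) => r.set ((j+1) + k) ((fun k => g (k+1)) k (r.getD ((j+1) + k) dflt))) := by
      funext r k
      have e : j + Nat.succ k = (j+1) + k := by omega
      rw [e]
    rw [hb1, ih (fun k => g (k+1)) (j+1) _ (by rw [List.length_set]; omega)]
    have hj : j < xs.length := by omega
    have hgd : ∀ m, (xs.set (j+0) (g 0 (xs.getD (j+0) dflt))).getD ((j+1) + m) dflt = xs.getD ((j+1)+m) dflt := by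
      intro m
      unfold List.getD
      rw [List.getElem?_set_ne (by omega)]
    have htake : (xs.set (j+0) (g 0 (xs.getD (j+0) dflt))).take (j+1) = xs.take j ++ [g 0 (xs.getD (j+0) dflt)] := by
      have e : j + 0 = j := by omega
      rw [e]
      exact take_succ_set xs j _ hj
    have hdrop : (xs.set (j+0) (g 0 (xs.getD (j+0) dflt))).drop ((j+1) + b) = xs.drop ((j+1)+b) := by
      exact List.drop_set_of_lt (by omega)
    simp only [hgd, htake, hdrop]
    rw [List.map_cons, List.map_map]
    have hcomp : (fun k => g k (xs.getD (j + k) dflt)) ∘ Nat.succ = fun k => g (k+1) (xs.getD ((j+1) + k) dflt) := by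
      funext k
      simp only [Function.comp]
      have e : j + Nat.succ k = (j+1) + k := by omega
      rw [e]
    rw [hcomp]
    simp only [List.append_assoc, List.cons_append, List.nil_append]
    have e2 : (j+1) + b = j + (b+1) := by omega
    rw [e2]

-- a fold that only rewrites row r commutes with .set r
theorem foldl_set_comm {α : Type} (dflt : α) (r : Nat) (f : Nat → α → α) :
    ∀ (l : List Nat) (res : List α),
      l.foldl (fun res k => res.set r (f k (res.getD r dflt))) res
        = res.set r (l.foldl (fun x k => f k x) (res.getD r dflt)) := by
  intro l
  induction l with
  | nil =>
    intro res
    simp only [List.foldl_nil]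
    by_cases hr : r < res.length
    · rw [List.getD_eq_getElem _ _ hr, List.set_getElem_self]
    · rw [List.set_eq_of_length_le (by omega)]
  | cons k l ih =>
    intro res
    simp only [List.foldl_cons]
    rw [ih]
    by_cases hr : r < res.length
    · have hgd : (res.set r (f k (res.getD r dflt))).getD r dflt = f k (res.getD r dflt) := by
        rw [List.getD_eq_getElem _ _ (by simpa using hr)]
        simp
      rw [hgd, List.set_set]
    · have hset : ∀ x : α, res.set r x = res := fun x => List.set_eq_of_length_le (by omega)
      simp only [hset]

theorem map_getD_range {α : Type} (dflt : α) (xs : List α) (i c : Nat) (h : i + c ≤ xs.length) :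
    (List.range c).map (fun m => xs.getD (i + m) dflt) = (xs.drop i).take c := by
  apply List.ext_getElem
  · simp; omega
  · intro k h1 h2
    simp only [List.length_map, List.length_range] at h1
    simp only [List.getElem_map, List.getElem_range, List.getElem_take, List.getElem_drop]
    rw [List.getD_eq_getElem _ _ (by omega)]

theorem range_reverse_map (n : Nat) :
    (List.range n).reverse = (List.range n).map (fun k => n - 1 - k) := by
  apply List.ext_getElem
  · simp
  · intro k h1 h2
    simp only [List.length_reverse, List.length_range] at h1
    simp only [List.getElem_reverse, List.getElem_map, List.getElem_range, List.length_range]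

-- the value A writes into cell (r, bN*u+k): row r read at its own length minus (bN*u+bN-k)
def VV (arr : List (List Int)) (bN r u k : Nat) : Int :=
  (arr.getD r []).getD ((arr.getD r []).length - (bN*u + bN - k)) 0

-- the block of values A writes into columns bN*u .. bN*u+bN-1 of row r
def SEG (arr : List (List Int)) (bN r u : Nat) : List Int :=
  (List.range bN).map (fun k => VV arr bN r u k)

-- the final content of row r
def MIRROW (arr : List (List Int)) (bN q r : Nat) : List Int :=
  ((List.range q).map (fun u => SEG arr bN r u)).flatten

theorem SEG_length (arr : List (List Int)) (bN r u : Nat) : (SEG arr bN r u).length = bN := by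
  simp [SEG]

theorem flat_SEG_length (arr : List (List Int)) (bN r : Nat) (u : Nat) :
    (((List.range u).map (fun uu => SEG arr bN r uu)).flatten).length = bN * u := by
  induction u with
  | zero => simp
  | succ u ih =>
    rw [List.range_succ, List.map_append, List.flatten_append]
    simp only [List.length_append, ih, List.map_cons, List.map_nil, List.flatten_cons,
      List.flatten_nil, List.append_nil, SEG_length]
    ring

-- A's port, canonicalised: Nat-indexed nested folds of single-cell writes
theorem A_eq_canon (arr : List (List Int)) (l : Int) (q p : Nat)
    (hn : (PySem.List.pyGetD arr 0 []).length = q * 2^l.toNat)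
    (hP : arr.length = p * 2^l.toNat)
    (hrow : ∀ row ∈ arr, q * 2^l.toNat ≤ row.length) :
    left_right_all arr l =
      (List.range p).foldl (fun res t =>
        (List.range q).foldl (fun res u =>
          (List.range (2^l.toNat)).foldl (fun res m =>
            (List.range (2^l.toNat)).foldl (fun res k =>
              res.set (2^l.toNat*t+m) ((res.getD (2^l.toNat*t+m) []).set (2^l.toNat*u+k)
                (VV arr (2^l.toNat) (2^l.toNat*t+m) u k))) res) res) res)
        (List.replicate arr.length (List.replicate (q * 2^l.toNat) (0:Int))) := by
  have hbc : (2:Int) ^ l.toNat = ((2^l.toNat : Nat) : Int) := by push_cast; ring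
  have hb : 0 < 2^l.toNat := Nat.two_pow_pos l.toNat
  simp only [left_right_all]
  rw [hbc, hn, hP]
  rw [pyRange_step_mul (2^l.toNat) p hb, pyRange_step_mul (2^l.toNat) q hb, pyRange_one_nat]
  simp only [List.foldl_map]
  rw [← hP]
  apply PySem.List.foldl_congr_mem
  intro res t ht
  have ht' : t < p := List.mem_range.mp ht
  apply PySem.List.foldl_congr_mem
  intro res2 u hu
  have hu' : u < q := List.mem_range.mp hu
  apply PySem.List.foldl_congr_mem
  intro res3 m hm
  have hm' : m < 2^l.toNat := List.mem_range.mp hm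
  apply PySem.List.foldl_congr_mem
  intro res4 k hk
  have hk' : k < 2^l.toNat := List.mem_range.mp hk
  have e1 : (((2^l.toNat*t : Nat) : Int) + ((m : Nat) : Int)) = ((2^l.toNat*t + m : Nat) : Int) := by
    push_cast; ring
  have e2 : (((2^l.toNat*u : Nat) : Int) + ((k : Nat) : Int)) = ((2^l.toNat*u + k : Nat) : Int) := by
    push_cast; ring
  have e3 : (-(((2^l.toNat*u : Nat) : Int)) - ((2^l.toNat : Nat) : Int) + ((k : Nat) : Int))
      = -(((2^l.toNat*u + 2^l.toNat - k : Nat)) : Int) := by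
    rw [Nat.cast_sub (by omega)]
    push_cast; ring
  rw [e1, e2, e3]
  simp only [pySet2, PySem.List.pySetD_natCast, PySem.List.pyGetD_natCast]
  have hrlt : 2^l.toNat*t + m < arr.length := by
    have h1 : 2^l.toNat*(t+1) ≤ 2^l.toNat*p := Nat.mul_le_mul_left _ (by omega)
    have h2 : 2^l.toNat*(t+1) = 2^l.toNat*t + 2^l.toNat := by ring
    have h3 : 2^l.toNat*p = p*2^l.toNat := Nat.mul_comm _ _
    omega
  have hrowlen : q*2^l.toNat ≤ (arr.getD (2^l.toNat*t + m) []).length := by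
    apply hrow
    rw [List.getD_eq_getElem _ _ hrlt]
    exact List.getElem_mem _
  have hK2 : 2^l.toNat*u + 2^l.toNat - k ≤ (arr.getD (2^l.toNat*t + m) []).length := by
    have h1 : 2^l.toNat*(u+1) ≤ 2^l.toNat*q := Nat.mul_le_mul_left _ (by omega)
    have h2 : 2^l.toNat*(u+1) = 2^l.toNat*u + 2^l.toNat := by ring
    have h3 : 2^l.toNat*q = q*2^l.toNat := Nat.mul_comm _ _
    omega
  rw [PySem.List.pyGetD_neg_natCast _ _ _ (by omega) hK2]
  simp only [VV]
  have hpos : 0 < 2^l.toNat*u + 2^l.toNat - k := by omega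
  have hlt : (arr.getD (2^l.toNat*t + m) []).length - (2^l.toNat*u + 2^l.toNat - k)
      < (arr.getD (2^l.toNat*t + m) []).length := by omega
  rw [List.getD_eq_getElem _ _ hlt]

-- the j-loop (with the m- and k-loops inside) rewrites rows i..i+bN-1, columns 0..bN*u-1
theorem Jlem (arr : List (List Int)) (bN q i : Nat) (hq : 0 < bN) :
    ∀ (u : Nat), u ≤ q → ∀ (res₀ : List (List Int)), i + bN ≤ res₀.length →
      (∀ m, m < bN → (res₀.getD (i+m) []).length = q * bN) →
      (List.range u).foldl (fun res uu =>
          (List.range bN).foldl (fun res m =>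
            (List.range bN).foldl (fun res k =>
              res.set (i+m) ((res.getD (i+m) []).set (bN*uu+k) (VV arr bN (i+m) uu k))) res) res) res₀
      = res₀.take i ++ (List.range bN).map (fun m =>
          ((List.range u).map (fun uu => SEG arr bN (i+m) uu)).flatten ++ (res₀.getD (i+m) []).drop (bN*u))
        ++ res₀.drop (i+bN) := by
  intro u
  induction u with
  | zero =>
    intro _ res₀ hlen _hrows
    simp only [List.range_zero, List.foldl_nil, Nat.mul_zero, List.drop_zero, List.map_nil,
      List.flatten_nil, List.nil_append]
    rw [map_getD_range [] res₀ i bN hlen, List.append_assoc]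
    rw [show i + bN = i + bN from rfl]
    have h1 : res₀.drop (i + bN) = (res₀.drop i).drop bN := by rw [List.drop_drop]
    rw [h1, List.take_append_drop, List.take_append_drop]
  | succ u ih =>
    intro hu res₀ hlen hrows
    rw [List.range_succ, List.foldl_append, List.foldl_cons, List.foldl_nil]
    rw [ih (by omega) res₀ hlen hrows]
    set F : Nat → List Int := fun m =>
      ((List.range u).map (fun uu => SEG arr bN (i+m) uu)).flatten ++ (res₀.getD (i+m) []).drop (bN*u) with hF
    set E : List (List Int) := res₀.take i ++ (List.range bN).map F ++ res₀.drop (i+bN) with hE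
    have hlen_take : (res₀.take i).length = i := by rw [List.length_take]; omega
    have hlenE : E.length = res₀.length := by
      simp only [hE, List.length_append, hlen_take, List.length_map, List.length_range,
        List.length_drop]
      omega
    have hcomm : ∀ (res : List (List Int)), ∀ m ∈ List.range bN,
        (List.range bN).foldl (fun res k =>
          res.set (i+m) ((res.getD (i+m) []).set (bN*u+k) (VV arr bN (i+m) u k))) res
        = res.set (i+m) ((List.range bN).foldl
            (fun x k => x.set (bN*u+k) (VV arr bN (i+m) u k)) (res.getD (i+m) [])) :=
      fun res m _ => foldl_set_comm [] (i+m)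
        (fun k x => x.set (bN*u+k) (VV arr bN (i+m) u k)) (List.range bN) res
    rw [PySem.List.foldl_congr_mem _ _ _ _ hcomm]
    have hstep : (List.range bN).foldl (fun res m =>
        res.set (i+m) ((List.range bN).foldl
          (fun x k => x.set (bN*u+k) (VV arr bN (i+m) u k)) (res.getD (i+m) []))) E
        = E.take i ++ (List.range bN).map (fun m =>
            (List.range bN).foldl (fun x k => x.set (bN*u+k) (VV arr bN (i+m) u k)) (E.getD (i+m) []))
          ++ E.drop (i+bN) :=
      foldl_set_seg [] (fun m x => (List.range bN).foldl
        (fun x k => x.set (bN*u+k) (VV arr bN (i+m) u k)) x) bN i E (by rw [hlenE]; omega)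
    rw [hstep]
    have htakeE : E.take i = res₀.take i := by
      rw [hE, List.append_assoc]
      exact List.take_left' hlen_take
    have hdropE : E.drop (i+bN) = res₀.drop (i+bN) := by
      rw [hE]
      exact List.drop_left' (by simp [hlen_take])
    have hrowE : ∀ m, m < bN → E.getD (i+m) [] = F m := by
      intro m hm
      rw [hE, List.append_assoc,
        List.getD_append_right _ _ _ _ (by omega),
        hlen_take]
      have e : i + m - i = m := by omega
      rw [e, List.getD_append _ _ _ _ (by simp; omega)]
      exact PySem.List.getD_map_range F bN m [] hm
    rw [htakeE, hdropE]
    congr 1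
    congr 1
    apply List.map_congr_left
    intro m hmm
    have hm : m < bN := List.mem_range.mp hmm
    rw [hrowE m hm]
    have hflatlen : (((List.range u).map (fun uu => SEG arr bN (i+m) uu)).flatten).length = bN * u :=
      flat_SEG_length arr bN (i+m) u
    have hrowlen : (res₀.getD (i+m) []).length = q * bN := hrows m hm
    have hmul : bN*u + bN ≤ q * bN := by
      have h1 : bN * (u+1) ≤ bN * q := Nat.mul_le_mul_left bN (by omega)
      have h2 : bN * q = q * bN := Nat.mul_comm bN q
      have h3 : bN * (u+1) = bN*u + bN := by ring
      omega
    have hFlen : (F m).length = q * bN := by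
      rw [hF]
      simp only [List.length_append, hflatlen, List.length_drop, hrowlen]
      omega
    have hk : (List.range bN).foldl (fun x k => x.set (bN*u+k) (VV arr bN (i+m) u k)) (F m)
        = (F m).take (bN*u) ++ (List.range bN).map (fun k => VV arr bN (i+m) u k) ++ (F m).drop (bN*u + bN) :=
      foldl_set_seg 0 (fun k _ => VV arr bN (i+m) u k) bN (bN*u) (F m) (by omega)
    rw [hk]
    have htakeF : (F m).take (bN*u) = ((List.range u).map (fun uu => SEG arr bN (i+m) uu)).flatten := by
      rw [hF]
      exact List.take_left' hflatlen
    have hdropF : (F m).drop (bN*u + bN) = (res₀.getD (i+m) []).drop (bN*(u+1)) := by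
      rw [hF]
      have e1 : bN*u + bN = (((List.range u).map (fun uu => SEG arr bN (i+m) uu)).flatten).length + bN := by
        rw [hflatlen]
      have e2 : bN*u + bN = bN*(u+1) := by ring
      rw [e1, List.drop_length_add_append, List.drop_drop, e2]
    rw [htakeF, hdropF]
    have hseg : (List.range bN).map (fun k => VV arr bN (i+m) u k) = SEG arr bN (i+m) u := rfl
    rw [hseg]
    rw [List.map_append, List.flatten_append]
    simp only [List.map_cons, List.map_nil, List.flatten_cons, List.flatten_nil, List.append_nil,
      List.append_assoc]

-- the i-loop fills the result grid row-block by row-block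
theorem Ilem (arr : List (List Int)) (bN q p : Nat) (hb : 0 < bN)
    (hP : arr.length = p * bN) :
    ∀ (t : Nat), t ≤ p →
      (List.range t).foldl (fun res tt =>
        (List.range q).foldl (fun res u =>
          (List.range bN).foldl (fun res m =>
            (List.range bN).foldl (fun res k =>
              res.set (bN*tt+m) ((res.getD (bN*tt+m) []).set (bN*u+k) (VV arr bN (bN*tt+m) u k))) res) res) res)
        (List.replicate arr.length (List.replicate (q * bN) (0:Int)))
      = (List.range (bN*t)).map (MIRROW arr bN q) ++
          List.replicate (arr.length - bN*t) (List.replicate (q * bN) (0:Int)) := by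
  intro t
  induction t with
  | zero =>
    intro _
    simp
  | succ t ih =>
    intro ht
    rw [List.range_succ, List.foldl_append, List.foldl_cons, List.foldl_nil, ih (by omega)]
    set Et : List (List Int) := (List.range (bN*t)).map (MIRROW arr bN q) ++
      List.replicate (arr.length - bN*t) (List.replicate (q * bN) (0:Int)) with hEt
    have hmul1 : bN * (t+1) ≤ bN * p := Nat.mul_le_mul_left bN (by omega)
    have hmul2 : bN * (t+1) = bN*t + bN := by ring
    have hmul3 : bN * p = p * bN := Nat.mul_comm bN p
    have hlenmap : ((List.range (bN*t)).map (MIRROW arr bN q)).length = bN*t := by simp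
    have hlenEt : Et.length = arr.length := by
      simp only [hEt, List.length_append, hlenmap, List.length_replicate]
      omega
    have hcond : bN*t + bN ≤ Et.length := by omega
    have hrows : ∀ m, m < bN → (Et.getD (bN*t+m) []).length = q * bN := by
      intro m hm
      rw [hEt, List.getD_append_right _ _ _ _ (by omega), hlenmap]
      rw [List.getD_replicate _ (by omega)]
      simp
    rw [Jlem arr bN q (bN*t) hb q (le_refl q) Et hcond hrows]
    have htakeEt : Et.take (bN*t) = (List.range (bN*t)).map (MIRROW arr bN q) := by
      rw [hEt]
      exact List.take_left' hlenmap
    have hdropEt : Et.drop (bN*t+bN) = List.replicate (arr.length - bN*(t+1)) (List.replicate (q * bN) (0:Int)) := by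
      rw [hEt]
      have e1 : bN*t + bN = ((List.range (bN*t)).map (MIRROW arr bN q)).length + bN := by
        rw [hlenmap]
      rw [e1, List.drop_length_add_append, List.drop_replicate]
      congr 1
      omega
    rw [htakeEt, hdropEt]
    have hmid : (List.range bN).map (fun m =>
        ((List.range q).map (fun uu => SEG arr bN (bN*t+m) uu)).flatten ++ (Et.getD (bN*t+m) []).drop (bN*q))
        = (List.range bN).map (fun m => MIRROW arr bN q (bN*t+m)) := by
      apply List.map_congr_left
      intro m hmm
      have hm : m < bN := List.mem_range.mp hmm
      have hget : Et.getD (bN*t+m) [] = List.replicate (q * bN) (0:Int) := by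
        rw [hEt, List.getD_append_right _ _ _ _ (by omega), hlenmap]
        rw [List.getD_replicate _ (by omega)]
      rw [hget, List.drop_replicate]
      have e2 : q * bN - bN*q = 0 := by
        have : q * bN = bN * q := Nat.mul_comm q bN
        omega
      rw [e2]
      simp [MIRROW]
    rw [hmid]
    have e3 : List.range (bN*(t+1)) = List.range (bN*t) ++ (List.range bN).map (fun m => bN*t + m) := by
      rw [hmul2, List.range_add]
    rw [e3, List.map_append, List.map_map]
    have e4 : MIRROW arr bN q ∘ (fun m => bN*t + m) = fun m => MIRROW arr bN q (bN*t+m) := rfl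
    rw [e4]

theorem A_main (arr : List (List Int)) (l : Int) (q p : Nat)
    (hn : (PySem.List.pyGetD arr 0 []).length = q * 2^l.toNat)
    (hP : arr.length = p * 2^l.toNat)
    (hrow : ∀ row ∈ arr, q * 2^l.toNat ≤ row.length) :
    left_right_all arr l = (List.range arr.length).map (MIRROW arr (2^l.toNat) q) := by
  rw [A_eq_canon arr l q p hn hP hrow,
    Ilem arr (2^l.toNat) q p (Nat.two_pow_pos l.toNat) hP p (le_refl p)]
  have e1 : 2^l.toNat*p = arr.length := by rw [hP]; ring
  rw [e1]
  have e2 : arr.length - arr.length = 0 := by omega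
  rw [e2, List.replicate_zero, List.append_nil]

theorem B_main (arr : List (List Int)) (l : Int) (q : Nat)
    (hrow : ∀ row ∈ arr, row.length = q * 2^l.toNat) :
    left_right_all_alt arr l = (List.range arr.length).map (MIRROW arr (2^l.toNat) q) := by
  have hbc : (2:Int) ^ l.toNat = ((2^l.toNat : Nat) : Int) := by push_cast; ring
  have hb : 0 < 2^l.toNat := Nat.two_pow_pos l.toNat
  simp only [left_right_all_alt, hbc]
  apply List.ext_getElem
  · simp
  · intro r hr1 hr2
    simp only [List.length_map] at hr1
    rw [List.getElem_map, List.getElem_map, List.getElem_range]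
    set row : List Int := arr[r] with hrowdef
    have hrowmem : row ∈ arr := List.getElem_mem _
    have hrowlen : row.length = q * 2^l.toNat := hrow row hrowmem
    rw [show ((row.length : Nat) : Int) = ((q * 2^l.toNat : Nat) : Int) by rw [hrowlen]]
    rw [pyRange_step_mul (2^l.toNat) q hb]
    rw [List.map_map]
    have hblocks : ((List.range q).map ((fun c => PySem.List.slice row (some c) (some (c + ((2^l.toNat : Nat) : Int)))) ∘ (fun t => ((2^l.toNat * t : Nat) : Int))))
        = (List.range q).map (fun t => (row.drop (2^l.toNat * t)).take (2^l.toNat)) := by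
      apply List.map_congr_left
      intro t _
      simp only [Function.comp]
      exact PySem.List.slice_natCast_add row (2^l.toNat * t) (2^l.toNat)
    rw [hblocks, ← List.map_reverse, range_reverse_map, List.map_map, List.flatMap_id]
    simp only [MIRROW]
    congr 1
    apply List.map_congr_left
    intro u hu
    have hu' : u < q := List.mem_range.mp hu
    simp only [Function.comp, SEG]
    have hgr : arr.getD r [] = row := by
      rw [List.getD_eq_getElem _ _ hr1]
    have hC : 2^l.toNat*(q-1-u) + 2^l.toNat*u + 2^l.toNat = 2^l.toNat*q := by
      have e : (q-1-u) + u + 1 = q := by omega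
      calc 2^l.toNat*(q-1-u) + 2^l.toNat*u + 2^l.toNat
          = 2^l.toNat*((q-1-u)+u+1) := by ring
        _ = 2^l.toNat*q := by rw [e]
    have hQ : 2^l.toNat*q = q*2^l.toNat := Nat.mul_comm _ _
    apply List.ext_getElem
    · simp only [List.length_take, List.length_drop, hrowlen, List.length_map, List.length_range]
      omega
    · intro k hk1 hk2
      simp only [List.length_take, List.length_drop, hrowlen] at hk1
      have hk : k < 2^l.toNat := by omega
      rw [List.getElem_take, List.getElem_drop, List.getElem_map, List.getElem_range]
      simp only [VV, hgr]
      have hKpos : 0 < 2^l.toNat*u + 2^l.toNat - k := by omega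
      have hKle : 2^l.toNat*u + 2^l.toNat - k ≤ row.length := by omega
      rw [List.getD_eq_getElem _ _ (by omega)]
      congr 1
      omega

-- width 0 (all rows empty): A's j-loop is empty, B's block list is empty
theorem n_zero_case (arr : List (List Int)) (l : Int)
    (hrows : ∀ row ∈ arr, row.length = 0) :
    left_right_all arr l = left_right_all_alt arr l := by
  have hb : (0:Int) < 2 ^ l.toNat := pow_pos (by norm_num) _
  have hn : (PySem.List.pyGetD arr 0 []).length = 0 := by
    rw [pyGetD0]
    cases arr with
    | nil => rfl
    | cons x xs => exact hrows x (by simp)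
  have hr0 : PySem.List.pyRange 0 (0:Int) ((2:Int) ^ l.toNat) = [] := by
    rw [PySem.List.pyRange_of_pos _ _ hb]
    simp
  have hB : left_right_all_alt arr l = arr.map (fun _ => []) := by
    simp only [left_right_all_alt]
    apply List.map_congr_left
    intro row hrow
    have h0 : row.length = 0 := hrows row hrow
    rw [show ((row.length : Nat) : Int) = (0:Int) by rw [h0]; rfl, hr0]
    simp
  rw [hB]
  simp only [left_right_all, hn, Nat.cast_zero, hr0, List.foldl_nil,
    PySem.List.foldl_ignore, List.replicate_zero]
  rw [List.map_const']

-- ===== VERDICT (by name: the statement is the Claim_ definition above) =====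
theorem left_right_all_spec : Claim_equal_left_right_all := by
  intro arr l _hdom hpre
  unfold Spec_left_right_all
  obtain ⟨hl, hrect, hcase⟩ := hpre
  rcases hcase with h0 | ⟨⟨p, hP⟩, ⟨q, hn⟩⟩
  · exact n_zero_case arr l (fun row hr => by rw [hrect row hr, h0])
  · have hn' : (PySem.List.pyGetD arr 0 []).length = q * 2^l.toNat := by
      rw [pyGetD0, hn]; ring
    have hP' : arr.length = p * 2^l.toNat := by rw [hP]; ring
    have hrow' : ∀ row ∈ arr, row.length = q * 2^l.toNat := by
      intro row hr
      rw [hrect row hr, hn]; ring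
    rw [A_main arr l q p hn' hP' (fun row hr => le_of_eq (hrow' row hr).symm),
      B_main arr l q hrow']
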